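-- pv_equiv track=rewrite | github.com/MrBrantCode/unitest_baseline | mut_generate/mist_train_cf/cf_7779/solution.py | most_vowels_word
-- ===== SOURCE A (Python) =====
-- def most_vowels_word(sentence):
--     max_vowels_count = 0
--     max_vowels_word = ''
--     current_vowels_count = 0
--     current_vowels_word = ''
--
--     for c in sentence:
--         if c.isalpha():
--             if c.lower() in 'aeiou':
--                 current_vowels_count += 1
--                 current_vowels_word += c
--             else:
--                 if current_vowels_count > max_vowels_count:
--                     max_vowels_count = current_vowels_count
--                     max_vowels_word = current_vowels_word
--                 current_vowels_count = 0
--                 current_vowels_word = ''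
--         elif not c.isalnum():
--             if current_vowels_count > max_vowels_count:
--                 max_vowels_count = current_vowels_count
--                 max_vowels_word = current_vowels_word
--             current_vowels_count = 0
--             current_vowels_word = ''
--
--     if current_vowels_count > max_vowels_count:
--         max_vowels_count = current_vowels_count
--         max_vowels_word = current_vowels_word
--
--     return max_vowels_word
-- ===== SOURCE B (Python) =====
-- def most_vowels_word(sentence):
--     # Phase 1: replace every segment-breaking char (non-vowel letter or non-alnum) by a space.
--     marked = ''.join(
--         c if c.isalnum() and (not c.isalpha() or c.lower() in 'aeiou') else ' '
--         for c in sentence)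
--     # Phase 2: split into segments and keep the first segment with the most vowels.
--     best = ''
--     for seg in marked.split(' '):
--         word = ''.join(c for c in seg if c.isalpha())
--         if len(word) > len(best):
--             best = word
--     return best
-- ===== Notes on version B (the rewrite author's own statement) =====
-- stated objective: alternative
-- what changed: A's single streaming loop with four running accumulators is replaced by a two-phase pipeline: mark every segment-breaking character as a space, split the marked string on spaces, then keep the first segment whose vowel word is strictly longest.
import Mathlib
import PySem

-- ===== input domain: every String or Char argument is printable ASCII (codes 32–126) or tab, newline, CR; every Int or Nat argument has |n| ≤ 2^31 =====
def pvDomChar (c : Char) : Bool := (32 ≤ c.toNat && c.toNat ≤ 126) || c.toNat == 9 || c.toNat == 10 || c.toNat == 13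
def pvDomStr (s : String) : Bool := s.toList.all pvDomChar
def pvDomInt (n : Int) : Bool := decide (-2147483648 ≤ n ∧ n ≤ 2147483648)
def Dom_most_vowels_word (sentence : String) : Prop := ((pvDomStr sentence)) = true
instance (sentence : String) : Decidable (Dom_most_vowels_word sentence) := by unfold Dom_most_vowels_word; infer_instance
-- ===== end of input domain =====

-- B re-implements A (single streaming accumulator loop) as a two-phase split: mark every
-- segment-breaking char as a space, split on spaces, keep the first segment with most vowels.
-- Objective: alternative decomposition; same O(n) cost.

-- ===== PORT A =====
-- c.lower() in 'aeiou'  (shared by both Pythons verbatim)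
def pvVowel (c : Char) : Bool :=
  PySem.Chars.isIn [PySem.Chars.lowerChar c] ['a', 'e', 'i', 'o', 'u']

def most_vowels_word (sentence : String) : String :=
  let fin := sentence.toList.foldl
    (fun (st : Int × List Char × Int × List Char) c =>
      if PySem.Chars.isalpha c then
        if pvVowel c then (st.1, st.2.1, st.2.2.1 + 1, st.2.2.2 ++ [c])
        else if st.2.2.1 > st.1 then (st.2.2.1, st.2.2.2, 0, ([] : List Char))
        else (st.1, st.2.1, 0, ([] : List Char))
      else if !PySem.Chars.isalnum c then
        if st.2.2.1 > st.1 then (st.2.2.1, st.2.2.2, 0, ([] : List Char))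
        else (st.1, st.2.1, 0, ([] : List Char))
      else st)
    (0, [], 0, [])
  String.ofList (if fin.2.2.1 > fin.1 then fin.2.2.2 else fin.2.1)

-- ===== PORT B =====
-- phase-1 marker: non-breaking chars kept, breaking chars become ' '
def pvMark (c : Char) : Char :=
  if PySem.Chars.isalnum c && (!PySem.Chars.isalpha c || pvVowel c) then c else ' '

def most_vowels_word_alt (sentence : String) : String :=
  let marked := sentence.toList.map pvMark
  let best := (PySem.Chars.splitOn marked [' ']).foldl
    (fun best seg =>
      let word := seg.filter PySem.Chars.isalpha
      if word.length > best.length then word else best)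
    []
  String.ofList best

-- ===== PRECONDITION & SPEC =====
def Spec_most_vowels_word (sentence : String) (out : String) : Prop := out = most_vowels_word_alt sentence
instance (sentence : String) (out : String) : Decidable (Spec_most_vowels_word sentence out) := by unfold Spec_most_vowels_word; infer_instance

-- ===== CLAIM (what is proved, stated in full; the proofs are below) =====
def Claim_equal_most_vowels_word : Prop := ∀ (sentence : String), Dom_most_vowels_word sentence → Spec_most_vowels_word sentence (most_vowels_word sentence)

-- ===== LEMMAS AND PROOFS =====

-- a char breaks a segment (negation of pvMark's keep-test)
def pvBreak (c : Char) : Bool :=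
  !(PySem.Chars.isalnum c && (!PySem.Chars.isalpha c || pvVowel c))

-- prepend to the first piece (pieces list is always nonempty)
def pvConsHead (x : List Char) : List (List Char) → List (List Char)
  | [] => [x]
  | h :: t => (x ++ h) :: t

-- maximal non-breaking segments, raw chars
def pvSegs : List Char → List (List Char)
  | [] => [[]]
  | c :: t => if pvBreak c then [] :: pvSegs t else pvConsHead [c] (pvSegs t)

-- maximal non-breaking segments, vowels only
def pvVsegs : List Char → List (List Char)
  | [] => [[]]
  | c :: t =>
    if pvBreak c then [] :: pvVsegs t
    else if PySem.Chars.isalpha c then pvConsHead [c] (pvVsegs t)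
    else pvVsegs t

def pvBest (b w : List Char) : List Char := if w.length > b.length then w else b

-- A's final step
def pvFin (st : Int × List Char × Int × List Char) : List Char :=
  if st.2.2.1 > st.1 then st.2.2.2 else st.2.1

-- A's loop body, named for the proofs (syntactically the port's lambda)
def pvAstep (st : Int × List Char × Int × List Char) (c : Char) :
    Int × List Char × Int × List Char :=
  if PySem.Chars.isalpha c then
    if pvVowel c then (st.1, st.2.1, st.2.2.1 + 1, st.2.2.2 ++ [c])
    else if st.2.2.1 > st.1 then (st.2.2.1, st.2.2.2, 0, ([] : List Char))
    else (st.1, st.2.1, 0, ([] : List Char))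
  else if !PySem.Chars.isalnum c then
    if st.2.2.1 > st.1 then (st.2.2.1, st.2.2.2, 0, ([] : List Char))
    else (st.1, st.2.1, 0, ([] : List Char))
  else st

lemma pvSegs_ne_nil (l : List Char) : pvSegs l ≠ [] := by
  cases l with
  | nil => simp [pvSegs]
  | cons c t =>
    simp only [pvSegs]
    split
    · simp
    · cases h : pvSegs t <;> simp [pvConsHead]

lemma pvVsegs_ne_nil (l : List Char) : pvVsegs l ≠ [] := by
  induction l with
  | nil => simp [pvVsegs]
  | cons c t ih =>
    simp only [pvVsegs]
    split
    · simp
    · split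
      · cases h : pvVsegs t <;> simp [pvConsHead]
      · exact ih

lemma pvConsHead_nil {L : List (List Char)} (h : L ≠ []) : pvConsHead [] L = L := by
  cases L with
  | nil => exact absurd rfl h
  | cons a t => simp [pvConsHead]

lemma pvConsHead_consHead (x : List Char) (c : Char) (L : List (List Char)) :
    pvConsHead x (pvConsHead [c] L) = pvConsHead (x ++ [c]) L := by
  cases L <;> simp [pvConsHead]

lemma pvAlpha_alnum {c : Char} (h : PySem.Chars.isalpha c = true) :
    PySem.Chars.isalnum c = true := by
  simp [PySem.Chars.isalnum, h]

lemma pvMark_of_break {c : Char} (h : pvBreak c = true) : pvMark c = ' ' := by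
  unfold pvBreak at h; unfold pvMark
  simp only [Bool.not_eq_eq_eq_not, Bool.not_true] at h
  simp [h]

lemma pvMark_of_not_break {c : Char} (h : pvBreak c = false) : pvMark c = c := by
  unfold pvBreak at h; unfold pvMark
  simp only [Bool.not_eq_eq_eq_not, Bool.not_false] at h
  simp [h]

lemma pvNot_break_ne_space {c : Char} (h : pvBreak c = false) : c ≠ ' ' := by
  intro hc; subst hc
  simp [pvBreak, PySem.Chars.isalnum, PySem.Chars.isalpha, PySem.Chars.isupper,
    PySem.Chars.islower, PySem.Chars.isdigit] at h

lemma pvGo_eq (fuel : Nat) :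
    ∀ (l cur : List Char) (acc : List (List Char)), l.length < fuel →
      PySem.Chars.splitOn.go [' '] fuel (l.map pvMark) cur acc
        = acc.reverse ++ pvConsHead cur.reverse (pvSegs l) := by
  induction fuel with
  | zero => intro l cur acc h; omega
  | succ f ih =>
    intro l cur acc h
    cases l with
    | nil => simp [PySem.Chars.splitOn.go, pvSegs, pvConsHead]
    | cons c t =>
      simp only [List.map_cons]
      rw [PySem.Chars.splitOn.go.eq_def]
      simp only [List.isPrefixOf, Bool.and_true]
      by_cases hb : pvBreak c = true
      · rw [pvMark_of_break hb]
        simp only [beq_self_eq_true, if_pos, List.length_cons, List.drop_succ_cons,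
          List.length_nil, List.drop_zero]
        rw [ih t [] (cur.reverse :: acc) (by simpa using Nat.lt_of_succ_lt_succ h)]
        simp only [List.reverse_nil]
        rw [pvConsHead_nil (pvSegs_ne_nil t)]
        simp [pvSegs, hb, pvConsHead]
      · rw [Bool.not_eq_true] at hb
        rw [pvMark_of_not_break hb]
        have hne : (' ' == c) = false := by
          simp only [beq_eq_false_iff_ne]
          exact fun he => pvNot_break_ne_space hb he.symm
        rw [hne]
        simp only [Bool.false_eq_true, if_false]
        rw [ih t (c :: cur) acc (by simpa using Nat.lt_of_succ_lt_succ h)]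
        simp [pvSegs, hb, pvConsHead_consHead]

lemma pvSegs_filter (l : List Char) :
    (pvSegs l).map (List.filter PySem.Chars.isalpha) = pvVsegs l := by
  induction l with
  | nil => simp [pvSegs, pvVsegs]
  | cons c t ih =>
    simp only [pvSegs, pvVsegs]
    by_cases hb : pvBreak c = true
    · simp [hb, ih]
    · rw [Bool.not_eq_true] at hb
      simp only [hb, Bool.false_eq_true, if_false]
      by_cases ha : PySem.Chars.isalpha c = true
      · rw [if_pos ha, ← ih]
        cases h : pvSegs t with
        | nil => exact absurd h (pvSegs_ne_nil t)
        | cons s rest => simp [pvConsHead, List.filter, ha]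
      · rw [Bool.not_eq_true] at ha
        rw [if_neg (by simp [ha]), ← ih]
        cases h : pvSegs t with
        | nil => exact absurd h (pvSegs_ne_nil t)
        | cons s rest => simp [pvConsHead, List.filter, ha]

-- A's loop from a consistent state computes the running best over the vowel segments,
-- with the pending current word prepended to the first segment.
lemma pvA_loop (l : List Char) : ∀ (mw cw : List Char),
    pvFin (l.foldl pvAstep ((mw.length : Int), mw, (cw.length : Int), cw))
      = (pvConsHead cw (pvVsegs l)).foldl pvBest mw := by
  induction l with
  | nil =>
    intro mw cw
    simp only [List.foldl_nil, pvFin]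
    cases h : pvVsegs [] with
    | nil => exact absurd h (pvVsegs_ne_nil [])
    | cons s rest =>
      simp only [pvVsegs] at h
      cases h
      simp only [pvConsHead, List.foldl_cons, List.foldl_nil, pvBest, List.append_nil]
      by_cases hlt : mw.length < cw.length
      · rw [if_pos (show (cw.length : Int) > (mw.length : Int) by exact_mod_cast hlt),
          if_pos hlt]
      · rw [if_neg (show ¬((cw.length : Int) > (mw.length : Int)) by exact_mod_cast hlt),
          if_neg hlt]
  | cons c t ih =>
    intro mw cw
    simp only [List.foldl_cons]
    by_cases ha : PySem.Chars.isalpha c = true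
    · by_cases hv : pvVowel c = true
      · -- vowel: extend the current word
        have hb : pvBreak c = false := by simp [pvBreak, pvAlpha_alnum ha, ha, hv]
        rw [show pvAstep ((mw.length : Int), mw, (cw.length : Int), cw) c
              = ((mw.length : Int), mw, (((cw ++ [c]).length : Int)), cw ++ [c]) by
            simp [pvAstep, ha, hv]]
        rw [ih mw (cw ++ [c])]
        simp [pvVsegs, hb, ha, pvConsHead_consHead]
      · -- alpha consonant: break
        rw [Bool.not_eq_true] at hv
        have hb : pvBreak c = true := by simp [pvBreak, ha, hv]
        have hsplit : (pvConsHead cw (pvVsegs (c :: t))).foldl pvBest mw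
            = (pvVsegs t).foldl pvBest (pvBest mw cw) := by
          cases h : pvVsegs t with
          | nil => exact absurd h (pvVsegs_ne_nil t)
          | cons s rest => simp [pvVsegs, hb, h, pvConsHead]
        rw [hsplit]
        rw [show pvAstep ((mw.length : Int), mw, (cw.length : Int), cw) c
              = (if (cw.length : Int) > (mw.length : Int)
                  then ((cw.length : Int), cw, (0:Int), ([] : List Char))
                  else ((mw.length : Int), mw, (0:Int), ([] : List Char))) by
            simp [pvAstep, ha, hv]]
        by_cases hlt : mw.length < cw.length
        · rw [if_pos (show (cw.length : Int) > (mw.length : Int) by exact_mod_cast hlt)]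
          have h2 := ih cw ([] : List Char)
          simp only [List.length_nil, Nat.cast_zero] at h2
          rw [h2, pvConsHead_nil (pvVsegs_ne_nil t),
            show pvBest mw cw = cw from by simp [pvBest, hlt]]
        · rw [if_neg (show ¬((cw.length : Int) > (mw.length : Int)) by exact_mod_cast hlt)]
          have h2 := ih mw ([] : List Char)
          simp only [List.length_nil, Nat.cast_zero] at h2
          rw [h2, pvConsHead_nil (pvVsegs_ne_nil t),
            show pvBest mw cw = mw from by simp [pvBest, hlt]]
    · rw [Bool.not_eq_true] at ha
      by_cases hn : PySem.Chars.isalnum c = true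
      · -- non-alpha alnum (digit): transparent
        have hb : pvBreak c = false := by simp [pvBreak, hn, ha]
        rw [show pvAstep ((mw.length : Int), mw, (cw.length : Int), cw) c
              = ((mw.length : Int), mw, (cw.length : Int), cw) by simp [pvAstep, ha, hn]]
        rw [ih mw cw]
        simp [pvVsegs, hb, ha]
      · -- non-alnum: break
        rw [Bool.not_eq_true] at hn
        have hb : pvBreak c = true := by simp [pvBreak, hn]
        have hsplit : (pvConsHead cw (pvVsegs (c :: t))).foldl pvBest mw
            = (pvVsegs t).foldl pvBest (pvBest mw cw) := by
          cases h : pvVsegs t with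
          | nil => exact absurd h (pvVsegs_ne_nil t)
          | cons s rest => simp [pvVsegs, hb, h, pvConsHead]
        rw [hsplit]
        rw [show pvAstep ((mw.length : Int), mw, (cw.length : Int), cw) c
              = (if (cw.length : Int) > (mw.length : Int)
                  then ((cw.length : Int), cw, (0:Int), ([] : List Char))
                  else ((mw.length : Int), mw, (0:Int), ([] : List Char))) by
            simp [pvAstep, ha, hn]]
        by_cases hlt : mw.length < cw.length
        · rw [if_pos (show (cw.length : Int) > (mw.length : Int) by exact_mod_cast hlt)]
          have h2 := ih cw ([] : List Char)
          simp only [List.length_nil, Nat.cast_zero] at h2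
          rw [h2, pvConsHead_nil (pvVsegs_ne_nil t),
            show pvBest mw cw = cw from by simp [pvBest, hlt]]
        · rw [if_neg (show ¬((cw.length : Int) > (mw.length : Int)) by exact_mod_cast hlt)]
          have h2 := ih mw ([] : List Char)
          simp only [List.length_nil, Nat.cast_zero] at h2
          rw [h2, pvConsHead_nil (pvVsegs_ne_nil t),
            show pvBest mw cw = mw from by simp [pvBest, hlt]]

lemma pvA_eq (s : String) :
    most_vowels_word s = String.ofList ((pvVsegs s.toList).foldl pvBest []) := by
  have h := pvA_loop s.toList [] []
  simp only [List.length_nil, Nat.cast_zero] at h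
  rw [pvConsHead_nil (pvVsegs_ne_nil s.toList)] at h
  unfold most_vowels_word
  exact congrArg String.ofList h

lemma pvSplit_marked (s : String) :
    PySem.Chars.splitOn (s.toList.map pvMark) [' '] = pvSegs s.toList := by
  unfold PySem.Chars.splitOn
  rw [pvGo_eq ((s.toList.map pvMark).length + 1) s.toList [] [] (by simp)]
  simp [pvConsHead_nil (pvSegs_ne_nil s.toList)]

lemma pvB_eq (s : String) :
    most_vowels_word_alt s = String.ofList ((pvVsegs s.toList).foldl pvBest []) := by
  show String.ofList ((PySem.Chars.splitOn (s.toList.map pvMark) [' ']).foldl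
      (fun best seg =>
        let word := seg.filter PySem.Chars.isalpha
        if word.length > best.length then word else best) []) = _
  rw [pvSplit_marked, ← pvSegs_filter s.toList, List.foldl_map]
  rfl

-- ===== VERDICT (by name: the statement is the Claim_ definition above) =====
theorem most_vowels_word_spec : Claim_equal_most_vowels_word := by
  intro s _
  unfold Spec_most_vowels_word
  rw [pvA_eq, pvB_eq]
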